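-- pv_equiv track=rewrite | github.com/myudak/belajarUndip | SEMESTER_1/DasarProgrammin/responsi/1.py | DuelSihir
-- ===== SOURCE A (Python) =====
-- from typing import List
--
-- def FirstElmt(L):
--     return L[0]
--
-- def Tail(L: List) -> List:
--     """Tail(L): Menghasilkan list tanpa elemen pertama list L, mungkin kosong"""
--     return L[1:]
--
-- def isEmpty(L):
--     return L == []
--
-- def DuelSihir(S, M, skorS=0, skorM=0):
--     if isEmpty(S):
--         if skorS > skorM:
--             return "Snape Menang"
--         if skorS < skorM:
--             return "McGonagall Menang"
--         return "Keduanya Seri"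
--     if FirstElmt(S) == FirstElmt(M):
--         return DuelSihir(Tail(S), Tail(M), skorS + 1, skorM + 1)
--     if FirstElmt(S) > FirstElmt(M):
--         return DuelSihir(Tail(S), Tail(M), skorS + 1, skorM)
--     if FirstElmt(S) < FirstElmt(M):
--         return DuelSihir(Tail(S), Tail(M), skorS, skorM + 1)
-- ===== SOURCE B (Python) =====
-- def DuelSihir(S, M, skorS=0, skorM=0):
--     pairs = list(zip(S, M))
--     s = skorS + sum(1 for a, b in pairs if a >= b)
--     m = skorM + sum(1 for a, b in pairs if a <= b)
--     if s > m:
--         return "Snape Menang"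
--     if s < m:
--         return "McGonagall Menang"
--     return "Keduanya Seri"
-- ===== Notes on version B (the rewrite author's own statement) =====
-- stated objective: faster
-- what changed: Replaces the O(n^2) accumulator recursion (list slicing per call) with a single-pass closed-form tally: skorS gains one per round with S[i] >= M[i], skorM one per round with S[i] <= M[i] (two counts over zip(S, M)), then one three-way comparison.
import Mathlib
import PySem

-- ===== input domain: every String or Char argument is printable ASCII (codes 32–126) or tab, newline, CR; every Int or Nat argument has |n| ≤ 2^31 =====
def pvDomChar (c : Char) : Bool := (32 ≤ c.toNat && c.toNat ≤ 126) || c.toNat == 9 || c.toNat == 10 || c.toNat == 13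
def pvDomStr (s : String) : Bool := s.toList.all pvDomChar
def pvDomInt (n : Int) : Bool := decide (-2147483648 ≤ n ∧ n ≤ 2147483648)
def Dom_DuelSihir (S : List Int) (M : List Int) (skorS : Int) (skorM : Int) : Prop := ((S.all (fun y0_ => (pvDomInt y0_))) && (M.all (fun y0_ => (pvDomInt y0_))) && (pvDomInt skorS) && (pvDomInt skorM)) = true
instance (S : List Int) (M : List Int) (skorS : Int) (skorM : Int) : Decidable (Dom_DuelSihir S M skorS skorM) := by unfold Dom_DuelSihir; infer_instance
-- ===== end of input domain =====

-- B replaces A's accumulator recursion with two closed-form counts over zip(S, M) ('simpler').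

-- ===== PORT A =====
-- A's recursion on S; when S ≠ [] Python reads M[0], raising IndexError on empty M:
-- that input is excluded by Pre_DuelSihir, the port returns "" there (arbitrary, never claimed).
def DuelSihir (S : List Int) (M : List Int) (skorS : Int) (skorM : Int) : String :=
  match S with
  | [] =>
    if skorS > skorM then "Snape Menang"
    else if skorS < skorM then "McGonagall Menang"
    else "Keduanya Seri"
  | a :: S' =>
    match M with
    | [] => ""  -- IndexError in Python (outside Pre_)
    | b :: M' =>
      if a = b then DuelSihir S' M' (skorS + 1) (skorM + 1)
      else if a > b then DuelSihir S' M' (skorS + 1) skorM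
      else DuelSihir S' M' skorS (skorM + 1)

-- ===== PORT B =====
def DuelSihir_alt (S : List Int) (M : List Int) (skorS : Int) (skorM : Int) : String :=
  let pairs := S.zip M
  let s := skorS + (pairs.countP (fun p => p.1 ≥ p.2) : Int)
  let m := skorM + (pairs.countP (fun p => p.1 ≤ p.2) : Int)
  if s > m then "Snape Menang"
  else if s < m then "McGonagall Menang"
  else "Keduanya Seri"

-- ===== PRECONDITION & SPEC =====
-- Pre_ excludes exactly the inputs where A raises IndexError: M shorter than S.
def Pre_DuelSihir (S : List Int) (M : List Int) (skorS : Int) (skorM : Int) : Prop :=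
  S.length ≤ M.length
instance (S : List Int) (M : List Int) (skorS : Int) (skorM : Int) : Decidable (Pre_DuelSihir S M skorS skorM) := by unfold Pre_DuelSihir; infer_instance
def pvWitness_DuelSihir : List Int × List Int × Int × Int := ([3, 1, 2], [2, 1, 5], 0, 0)

def Spec_DuelSihir (S : List Int) (M : List Int) (skorS : Int) (skorM : Int) (out : String) : Prop := out = DuelSihir_alt S M skorS skorM
instance (S : List Int) (M : List Int) (skorS : Int) (skorM : Int) (out : String) : Decidable (Spec_DuelSihir S M skorS skorM out) := by unfold Spec_DuelSihir; infer_instance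

-- ===== CLAIM (what is proved, stated in full; the proofs are below) =====
def Claim_equal_DuelSihir : Prop := ∀ (S : List Int) (M : List Int) (skorS : Int) (skorM : Int), Dom_DuelSihir S M skorS skorM → Pre_DuelSihir S M skorS skorM → Spec_DuelSihir S M skorS skorM (DuelSihir S M skorS skorM)
-- ===== LEMMAS AND PROOFS =====
lemma alt_cons (a b : Int) (S M : List Int) (skorS skorM : Int) :
    DuelSihir_alt (a :: S) (b :: M) skorS skorM
      = DuelSihir_alt S M (skorS + if a ≥ b then 1 else 0) (skorM + if a ≤ b then 1 else 0) := by
  simp only [DuelSihir_alt, List.zip_cons_cons, List.countP_cons]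
  by_cases h1 : a ≥ b <;> by_cases h2 : a ≤ b <;>
    simp [h1, h2, add_assoc, add_comm]

lemma duel_eq (S : List Int) : ∀ (M : List Int) (skorS skorM : Int),
    S.length ≤ M.length → DuelSihir S M skorS skorM = DuelSihir_alt S M skorS skorM := by
  induction S with
  | nil =>
    intro M skorS skorM _
    simp [DuelSihir, DuelSihir_alt]
  | cons a S' ih =>
    intro M skorS skorM h
    cases M with
    | nil => simp at h
    | cons b M' =>
      rw [alt_cons]
      simp only [List.length_cons, Nat.add_le_add_iff_right] at h
      simp only [DuelSihir]
      rcases lt_trichotomy a b with hab | hab | hab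
      · rw [if_neg (by omega), if_neg (by omega), if_neg (by omega), if_pos (by omega)]
        simpa using ih M' skorS (skorM + 1) h
      · rw [if_pos hab, if_pos (by omega), if_pos (by omega)]
        exact ih M' (skorS + 1) (skorM + 1) h
      · rw [if_neg (by omega), if_pos hab, if_pos (by omega), if_neg (by omega)]
        simpa using ih M' (skorS + 1) skorM h

-- ===== VERDICT (by name: the statement is the Claim_ definition above) =====
theorem DuelSihir_spec : Claim_equal_DuelSihir := by
  intro S M skorS skorM _ hpre
  unfold Spec_DuelSihir
  exact (duel_eq S M skorS skorM hpre)
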